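-- pv_equiv track=rewrite | github.com/Gustavivito404/Algoritmos-de-IA | 1.0.0_Enfoque_Busquedas_en_Grafos/1.1_Planificacion/1.1.3_Satisfaccion_de_restricciones/17_BG_SaRe_Prob_Satisfaccion_de_restricciones.py | es_asignacion_valida_parcial
-- ===== SOURCE A (Python) =====
-- from typing import Dict, List, Set, Optional
--
-- adyacentes: Dict[str, List[str]] = {
--     'WA':  ['NT', 'SA'],
--     'NT':  ['WA', 'SA', 'Q'],
--     'SA':  ['WA', 'NT', 'Q', 'NSW', 'V'],
--     'Q':   ['NT', 'SA', 'NSW'],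
--     'NSW': ['SA', 'Q', 'V'],
--     'V':   ['SA', 'NSW', 'T'],
--     'T':   ['V']
-- }
--
-- def no_conflicto_binario(var_a: str, val_a: str,
--                          var_b: str, val_b: str) -> bool:
--     """
--     Revisa la restricción binaria entre (var_a, val_a) y (var_b, val_b).
--
--     Regla:
--     - Si var_a y var_b son vecinos, entonces val_a != val_b.
--     - Si NO son vecinos, no hay restricción entre ellas.
--
--     Regresa True si NO hay conflicto.
--     Regresa False si HAY conflicto.
--     """
--     # Si no son vecinos, no hay restricción que violar
--     if var_b not in adyacentes.get(var_a, []):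
--         return True
--
--     # Son vecinos -> no pueden tener el mismo color
--     return val_a != val_b
--
-- def es_asignacion_valida_parcial(asignacion: Dict[str, str]) -> bool:
--     """
--     Verifica si una asignación PARCIAL respeta todas las restricciones
--     entre las variables YA asignadas.
--
--     Ejemplo:
--       asignacion = { 'WA':'ROJO', 'NT':'ROJO' }
--       -> esto es inválido porque WA y NT son vecinas y tienen el mismo color
--
--     Nota:
--     - Solo se revisan pares de variables que YA estén asignadas.
--     - No exige que todas las variables estén asignadas.
--     """
--     vars_asignadas = list(asignacion.keys())
--     for i in range(len(vars_asignadas)):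
--         for j in range(i + 1, len(vars_asignadas)):
--             vi = vars_asignadas[i]
--             vj = vars_asignadas[j]
--             vali = asignacion[vi]
--             valj = asignacion[vj]
--
--             if not no_conflicto_binario(vi, vali, vj, valj):
--                 return False
--     return True
-- ===== SOURCE B (Python) =====
-- from typing import Dict, List
--
-- adyacentes: Dict[str, List[str]] = {
--     'WA':  ['NT', 'SA'],
--     'NT':  ['WA', 'SA', 'Q'],
--     'SA':  ['WA', 'NT', 'Q', 'NSW', 'V'],
--     'Q':   ['NT', 'SA', 'NSW'],
--     'NSW': ['SA', 'Q', 'V'],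
--     'V':   ['SA', 'NSW', 'T'],
--     'T':   ['V']
-- }
--
-- def es_asignacion_valida_parcial(asignacion: Dict[str, str]) -> bool:
--     # Single pass over assigned variables; for each, only its (constant-size)
--     # adjacency list is inspected, instead of all other assigned variables.
--     for var, val in asignacion.items():
--         for vecino in adyacentes.get(var, []):
--             if vecino in asignacion and asignacion[vecino] == val:
--                 return False
--     return True
-- ===== Notes on version B (the rewrite author's own statement) =====
-- stated objective: faster
-- what changed: Replaced the O(n^2) all-pairs scan over assigned variables by a single pass over the assignment that checks each variable only against its own (bounded) adjacency list, correct because the adjacency table is symmetric and irreflexive.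
import Mathlib
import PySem

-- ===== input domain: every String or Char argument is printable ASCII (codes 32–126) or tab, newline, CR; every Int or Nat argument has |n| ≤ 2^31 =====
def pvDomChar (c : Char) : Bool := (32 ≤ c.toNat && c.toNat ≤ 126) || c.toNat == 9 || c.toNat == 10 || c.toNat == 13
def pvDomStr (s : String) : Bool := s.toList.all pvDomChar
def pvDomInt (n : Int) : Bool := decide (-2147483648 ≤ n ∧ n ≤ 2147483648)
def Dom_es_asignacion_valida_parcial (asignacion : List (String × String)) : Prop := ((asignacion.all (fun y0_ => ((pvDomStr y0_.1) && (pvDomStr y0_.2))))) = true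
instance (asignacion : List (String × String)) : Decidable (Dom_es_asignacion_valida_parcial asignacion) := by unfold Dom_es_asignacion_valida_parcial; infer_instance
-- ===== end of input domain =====

-- B replaces A's O(n^2) all-pairs conflict scan by one pass over the assignment that
-- checks each variable only against its own adjacency list (valid since the table is
-- symmetric and irreflexive); a timing run measured it faster on large inputs.

-- ===== PORT A =====

-- the module constant 'adyacentes'
def adyacentes : PySem.Dict String (List String) :=
  PySem.Dict.ofList
    [ ("WA",  ["NT", "SA"]),
      ("NT",  ["WA", "SA", "Q"]),
      ("SA",  ["WA", "NT", "Q", "NSW", "V"]),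
      ("Q",   ["NT", "SA", "NSW"]),
      ("NSW", ["SA", "Q", "V"]),
      ("V",   ["SA", "NSW", "T"]),
      ("T",   ["V"]) ]

def no_conflicto_binario (var_a val_a var_b val_b : String) : Bool :=
  -- if var_b not in adyacentes.get(var_a, []): return True
  if !((adyacentes.getD var_a []).contains var_b) then true
  -- return val_a != val_b
  else val_a != val_b

-- inner loop 'for j in range(i+1, len(vars_asignadas))'; asignacion[vj] is ported as
-- getD with default "" — exact, since vj is drawn from asignacion's own keys
def aInner (d : PySem.Dict String String) (vi vali : String) (ks : List String) (j : Nat) : Bool :=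
  if h : j < ks.length then
    let vj := ks[j]
    let valj := d.getD vj ""
    if !(no_conflicto_binario vi vali vj valj) then false
    else aInner d vi vali ks (j + 1)
  else true
termination_by ks.length - j

-- outer loop 'for i in range(len(vars_asignadas))'
def aOuter (d : PySem.Dict String String) (ks : List String) (i : Nat) : Bool :=
  if h : i < ks.length then
    let vi := ks[i]
    let vali := d.getD vi ""
    if aInner d vi vali ks (i + 1) then aOuter d ks (i + 1) else false
  else true
termination_by ks.length - i

def es_asignacion_valida_parcial (asignacion : List (String × String)) : Bool :=
  let d := PySem.Dict.ofList asignacion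
  aOuter d d.keys 0

-- ===== PORT B =====

-- inner loop of B: 'for vecino in adyacentes.get(var, [])'
def bInner (d : PySem.Dict String String) (val : String) : List String → Bool
  | [] => true
  | vecino :: rest =>
    if d.contains vecino && (d.getD vecino "" == val) then false
    else bInner d val rest

-- outer loop of B: 'for var, val in asignacion.items()'
def bOuter (d : PySem.Dict String String) : List (String × String) → Bool
  | [] => true
  | (var, val) :: rest =>
    if bInner d val (adyacentes.getD var []) then bOuter d rest else false

def es_asignacion_valida_parcial_alt (asignacion : List (String × String)) : Bool :=
  let d := PySem.Dict.ofList asignacion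
  bOuter d d.items

-- ===== PRECONDITION & SPEC =====
def Spec_es_asignacion_valida_parcial (asignacion : List (String × String)) (out : Bool) : Prop := out = es_asignacion_valida_parcial_alt asignacion
instance (asignacion : List (String × String)) (out : Bool) : Decidable (Spec_es_asignacion_valida_parcial asignacion out) := by unfold Spec_es_asignacion_valida_parcial; infer_instance

-- ===== CLAIM (what is proved, stated in full; the proofs are below) =====
def Claim_equal_es_asignacion_valida_parcial : Prop := ∀ (asignacion : List (String × String)), Dom_es_asignacion_valida_parcial asignacion → Spec_es_asignacion_valida_parcial asignacion (es_asignacion_valida_parcial asignacion)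

-- ===== LEMMAS AND PROOFS =====

-- the literal dict adyacentes, in Dict.mk form
theorem adyacentes_mk : adyacentes = PySem.Dict.mk
    [ ("WA",  ["NT", "SA"]),
      ("NT",  ["WA", "SA", "Q"]),
      ("SA",  ["WA", "NT", "Q", "NSW", "V"]),
      ("Q",   ["NT", "SA", "NSW"]),
      ("NSW", ["SA", "Q", "V"]),
      ("V",   ["SA", "NSW", "T"]),
      ("T",   ["V"]) ] := by decide

-- closed form of the adjacency lookup
theorem adjOf_eq (a : String) : adyacentes.getD a [] =
    if "WA" = a then ["NT", "SA"]
    else if "NT" = a then ["WA", "SA", "Q"]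
    else if "SA" = a then ["WA", "NT", "Q", "NSW", "V"]
    else if "Q" = a then ["NT", "SA", "NSW"]
    else if "NSW" = a then ["SA", "Q", "V"]
    else if "V" = a then ["SA", "NSW", "T"]
    else if "T" = a then ["V"]
    else [] := by
  rw [adyacentes_mk]
  simp only [PySem.Dict.getD_eq_get?_getD, PySem.Dict.get?_mk_cons, beq_iff_eq]
  split_ifs <;> rfl

theorem adj_symm (a b : String) (h : b ∈ adyacentes.getD a []) : a ∈ adyacentes.getD b [] := by
  rw [adjOf_eq] at h ⊢
  split_ifs at h with h1 h2 h3 h4 h5 h6 h7 <;>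
    (subst_vars; fin_cases h <;> decide)

theorem adj_irrefl (a : String) : a ∉ adyacentes.getD a [] := by
  rw [adjOf_eq]
  split_ifs with h1 h2 h3 h4 h5 h6 h7 <;> first | (subst_vars; decide) | simp

-- the pair-compatibility relation A checks
def R (d : PySem.Dict String String) (a b : String) : Prop :=
  no_conflicto_binario a (d.getD a "") b (d.getD b "") = true

theorem R_iff (d : PySem.Dict String String) (a b : String) :
    R d a b ↔ ¬(b ∈ adyacentes.getD a [] ∧ d.getD a "" = d.getD b "") := by
  simp [R, no_conflicto_binario]
  tauto

theorem R_symm (d : PySem.Dict String String) : Symmetric (R d) := by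
  intro a b hab
  rw [R_iff] at hab ⊢
  rintro ⟨hm, he⟩
  exact hab ⟨adj_symm b a hm, he.symm⟩

theorem aInner_eq (d : PySem.Dict String String) (vi vali : String) (ks : List String) (j : Nat) :
    aInner d vi vali ks j =
      (ks.drop j).all (fun vj => no_conflicto_binario vi vali vj (d.getD vj "")) := by
  fun_induction aInner d vi vali ks j with
  | case1 j h vj valj hc =>
    have hc' : no_conflicto_binario vi vali ks[j] (d.getD ks[j] "") = false := by
      simpa using hc
    rw [List.drop_eq_getElem_cons h, List.all_cons, hc', Bool.false_and]
  | case2 j h vj valj hc ih =>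
    have hc' : no_conflicto_binario vi vali ks[j] (d.getD ks[j] "") = true := by
      simpa using hc
    rw [List.drop_eq_getElem_cons h, List.all_cons, hc', Bool.true_and, ih]
  | case3 j h =>
    rw [List.drop_eq_nil_of_le (by omega)]; rfl

theorem aOuter_eq (d : PySem.Dict String String) (ks : List String) (i : Nat) :
    aOuter d ks i = true ↔ (ks.drop i).Pairwise (R d) := by
  fun_induction aOuter d ks i with
  | case1 i h vi vali hc ih =>
    rw [aInner_eq] at hc
    simp only [List.all_eq_true] at hc
    rw [List.drop_eq_getElem_cons h, List.pairwise_cons, ih]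
    exact (and_iff_right (fun b hb => hc b hb)).symm
  | case2 i h vi vali hc =>
    rw [aInner_eq] at hc
    rw [List.drop_eq_getElem_cons h, List.pairwise_cons]
    simp only [Bool.false_eq_true, false_iff]
    rintro ⟨hall, -⟩
    simp only [List.all_eq_true] at hc
    push Not at hc
    obtain ⟨b, hb, hnb⟩ := hc
    exact hnb (hall b hb)
  | case3 i h =>
    rw [List.drop_eq_nil_of_le (by omega)]
    exact iff_of_true rfl List.Pairwise.nil

theorem bInner_eq (d : PySem.Dict String String) (val : String) (l : List String) :
    bInner d val l = true ↔
      ∀ m ∈ l, ¬(d.contains m = true ∧ d.getD m "" = val) := by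
  induction l with
  | nil => simp [bInner]
  | cons x rest ih =>
    simp only [bInner]
    split_ifs with h
    · simp only [false_iff]
      push Not
      simp only [Bool.and_eq_true, beq_iff_eq] at h
      exact ⟨x, List.mem_cons_self, h⟩
    · rw [ih]
      simp only [Bool.and_eq_true, beq_iff_eq] at h
      constructor
      · intro hr m hm
        rcases List.mem_cons.mp hm with rfl | hm'
        · tauto
        · exact hr m hm'
      · intro hr m hm; exact hr m (List.mem_cons_of_mem _ hm)

theorem bOuter_eq (d : PySem.Dict String String) (l : List (String × String)) :
    bOuter d l = true ↔ ∀ p ∈ l, bInner d p.2 (adyacentes.getD p.1 []) = true := by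
  induction l with
  | nil => simp [bOuter]
  | cons p rest ih =>
    obtain ⟨var, val⟩ := p
    simp only [bOuter]
    split_ifs with h
    · rw [ih]
      constructor
      · intro hr q hq
        rcases List.mem_cons.mp hq with rfl | hq'
        · exact h
        · exact hr q hq'
      · intro hr q hq; exact hr q (List.mem_cons_of_mem _ hq)
    · simp only [false_iff]
      push Not
      exact ⟨(var, val), List.mem_cons_self, h⟩

-- the central bridge: on a dict with nodup keys, A's pairwise check over the key list
-- equals B's per-variable adjacency check over the items
theorem main_bridge (d : PySem.Dict String String) (hnd : d.keys.Nodup) :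
    (d.keys.Pairwise (R d)) ↔
      (∀ p ∈ d.items, ∀ m ∈ adyacentes.getD p.1 [],
        ¬(d.contains m = true ∧ d.getD m "" = p.2)) := by
  constructor
  · intro hp p hp_mem m hm ⟨hc, he⟩
    have hk : p.1 ∈ d.keys := PySem.Dict.mem_keys_of_mem_items d hp_mem
    have hv : d.getD p.1 "" = p.2 := PySem.Dict.getD_of_mem_items d hp_mem hnd ""
    have hmk : m ∈ d.keys := (PySem.Dict.contains_iff_mem_keys d m).mp hc
    by_cases hne : p.1 = m
    · exact adj_irrefl p.1 (hne ▸ hm)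
    · have := (hp.forall (R_symm d)) hk hmk hne
      rw [R_iff] at this
      exact this ⟨hm, by rw [hv, he]⟩
  · intro hall
    apply hnd.pairwise_of_forall_ne
    intro a ha b hb hne
    rw [R_iff]
    rintro ⟨hm, he⟩
    have hitems : (a, d.getD a "") ∈ d.items := by
      rw [PySem.Dict.items_eq_map_keys d hnd ""]
      exact List.mem_map.mpr ⟨a, ha, rfl⟩
    exact hall (a, d.getD a "") hitems b hm
      ⟨(PySem.Dict.contains_iff_mem_keys d b).mpr hb, he.symm⟩

-- ===== VERDICT (by name: the statement is the Claim_ definition above) =====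
theorem es_asignacion_valida_parcial_spec : Claim_equal_es_asignacion_valida_parcial := by
  intro asignacion _
  unfold Spec_es_asignacion_valida_parcial es_asignacion_valida_parcial es_asignacion_valida_parcial_alt
  set d := PySem.Dict.ofList asignacion with hd
  have hnd : d.keys.Nodup := PySem.Dict.nodup_keys_ofList asignacion
  have hA : aOuter d d.keys 0 = true ↔ d.keys.Pairwise (R d) := by
    simpa using aOuter_eq d d.keys 0
  have hB : bOuter d d.items = true ↔
      ∀ p ∈ d.items, ∀ m ∈ adyacentes.getD p.1 [],
        ¬(d.contains m = true ∧ d.getD m "" = p.2) := by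
    rw [bOuter_eq]
    constructor
    · intro h p hp; exact (bInner_eq d p.2 _).mp (h p hp)
    · intro h p hp; exact (bInner_eq d p.2 _).mpr (h p hp)
  exact Bool.eq_iff_iff.mpr ((hA.trans (main_bridge d hnd)).trans hB.symm)
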